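-- pv_equiv track=rewrite | github.com/Solialiranes/SAE-BUT-1 | SAE/SAE 1.02 - Comparaison d'une approche algorithmique - Lilian SOARES/biology.py | arn_to_codons
-- ===== SOURCE A (Python) =====
-- def arn_to_codons(arn):
--     i = 0
--     codons = []
--     mp_3 = len(arn) - len(arn)%3
--
--     while i < mp_3 :
--         codons.append(arn[i] + arn[i+1] + arn[i+2])
--         i = i + 3
--     return codons
-- ===== SOURCE B (Python) =====
-- def arn_to_codons(arn):
--     return [''.join(t) for t in zip(arn[0::3], arn[1::3], arn[2::3])]
-- ===== Notes on version B (the rewrite author's own statement) =====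
-- stated objective: idiomatic
-- what changed: B replaces the index-stepping while loop over positions with three strided slices arn[0::3]/arn[1::3]/arn[2::3] combined by zip, joining each triple into a codon; zip truncates the leftover 1-2 characters exactly as A's length bound does.
import Mathlib
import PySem

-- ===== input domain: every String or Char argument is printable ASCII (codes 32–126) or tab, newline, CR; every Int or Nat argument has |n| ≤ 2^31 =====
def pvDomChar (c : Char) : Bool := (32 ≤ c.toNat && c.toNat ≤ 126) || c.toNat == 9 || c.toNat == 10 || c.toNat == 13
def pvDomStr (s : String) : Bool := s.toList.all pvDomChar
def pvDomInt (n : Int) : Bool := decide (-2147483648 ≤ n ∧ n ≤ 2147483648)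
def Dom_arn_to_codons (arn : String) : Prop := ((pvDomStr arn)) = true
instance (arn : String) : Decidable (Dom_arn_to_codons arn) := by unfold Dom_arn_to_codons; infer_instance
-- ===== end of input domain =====

-- B replaces A's index-stepping while loop with three strided slices combined by zip (idiomatic decomposition; same cost).


-- ===== PORT A =====
-- the while loop: i steps by 3 while i < mp_3, appending arn[i]+arn[i+1]+arn[i+2]
def arn_to_codons_loop (l : List Char) (mp3 : Int) (i : Int) (codons : List String) : List String :=
  if _h : i < mp3 then
    let codon : String :=
      match PySem.List.pyGet? l i, PySem.List.pyGet? l (i + 1), PySem.List.pyGet? l (i + 2) with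
      | some a, some b, some c => String.ofList [a, b, c]   -- arn[i] + arn[i+1] + arn[i+2]
      | _, _, _ => ""                                        -- unreachable: i+2 < mp_3 ≤ len(arn)
    arn_to_codons_loop l mp3 (i + 3) (codons ++ [codon])
  else codons
termination_by (mp3 - i).toNat
decreasing_by omega

def arn_to_codons (arn : String) : List String :=
  let mp3 : Int := PySem.Str.len arn - PySem.Int.mod (PySem.Str.len arn) 3
  arn_to_codons_loop arn.toList mp3 0 []

-- ===== PORT B =====
-- [''.join(t) for t in zip(arn[0::3], arn[1::3], arn[2::3])]
def arn_to_codons_alt (arn : String) : List String :=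
  let l := arn.toList
  let s0 := (PySem.List.slice? l (some 0) none 3).getD []   -- arn[0::3]
  let s1 := (PySem.List.slice? l (some 1) none 3).getD []   -- arn[1::3]
  let s2 := (PySem.List.slice? l (some 2) none 3).getD []   -- arn[2::3]
  ((s0.zip s1).zip s2).map (fun p => String.ofList [p.1.1, p.1.2, p.2])

-- ===== PRECONDITION & SPEC =====
def Spec_arn_to_codons (arn : String) (out : List String) : Prop := out = arn_to_codons_alt arn
instance (arn : String) (out : List String) : Decidable (Spec_arn_to_codons arn out) := by unfold Spec_arn_to_codons; infer_instance

-- ===== CLAIM (what is proved, stated in full; the proofs are below) =====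
def Claim_equal_arn_to_codons : Prop := ∀ (arn : String), Dom_arn_to_codons arn → Spec_arn_to_codons arn (arn_to_codons arn)

-- ===== LEMMAS AND PROOFS =====

-- the common characterisation: the list of complete length-3 chunks
def pvChunks : List Char → List String
  | a :: b :: c :: rest => String.ofList [a, b, c] :: pvChunks rest
  | _ => []

-- every third element, starting at the head
def pvEvery3 {α : Type} : List α → List α
  | [] => []
  | a :: t => a :: pvEvery3 (t.drop 2)
termination_by l => l.length
decreasing_by simp only [List.length_drop, List.length_cons]; omega

-- core: the filterMap-over-range form that slice? computes equals pvEvery3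
lemma pvFilterMap_stride {α : Type} (m : List α) :
    List.filterMap (fun k => m[3 * k]?) (List.range ((m.length + 2) / 3)) = pvEvery3 m := by
  induction m using pvEvery3.induct with
  | case1 => simp [pvEvery3]
  | case2 a t ih =>
    have hcount : ((a :: t).length + 2) / 3 = ((t.drop 2).length + 2) / 3 + 1 := by
      simp [List.length_drop]; omega
    rw [hcount, List.range_succ_eq_map]
    simp only [List.filterMap_cons, List.filterMap_map]
    have h0 : (a :: t)[3 * 0]? = some a := by simp
    rw [h0]
    have hshift : ∀ k : ℕ, (a :: t)[3 * (k + 1)]? = (t.drop 2)[3 * k]? := by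
      intro k
      have h3 : 3 * (k + 1) = (3 * k + 2) + 1 := by ring
      rw [h3]
      simp only [List.getElem?_cons_succ]
      rw [show 3 * k + 2 = 2 + 3 * k by ring, ← List.getElem?_drop]
    simp only [Function.comp]
    rw [show (fun k => (a :: t)[3 * (k + 1)]?) = (fun k => (t.drop 2)[3 * k]?) from funext hshift]
    rw [ih]
    conv_rhs => rw [pvEvery3]

-- slice? with step 3 from a nonnegative start j is pvEvery3 of the j-drop
lemma pvSlice3_eq {α : Type} (l : List α) (j : Nat) :
    PySem.List.slice? l (some (j : Int)) none 3 = some (pvEvery3 (l.drop j)) := by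
  unfold PySem.List.slice? PySem.List.sliceIndices
  simp only [if_neg (by omega : ¬ (3:Int) = 0), if_neg (by omega : ¬ (3:Int) < 0)]
  have hstart : (if (j : Int) < 0 then max ((j : Int) + l.length) 0 else min (j : Int) l.length)
      = ((min j l.length : Nat) : Int) := by
    rw [if_neg (by omega)]; push_cast; omega
  rw [hstart, if_pos (show (0:Int) < 3 by norm_num)]
  have hdrop : l.drop j = l.drop (min j l.length) := by
    by_cases h : j ≤ l.length
    · rw [Nat.min_eq_left h]
    · rw [Nat.min_eq_right (by omega), List.drop_of_length_le (by omega),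
        List.drop_of_length_le (le_refl _)]
  rw [hdrop]
  set jm := min j l.length with hjm
  have hjml : jm ≤ l.length := by omega
  have hcount : (if ((jm : Nat) : Int) < (l.length : Int) then
      (((l.length : Int) - ((jm : Nat) : Int) + 3 - 1) / 3).toNat else 0)
      = ((l.drop jm).length + 2) / 3 := by
    rw [List.length_drop]
    split_ifs with h
    · omega
    · omega
  simp only [hcount]
  have harg : (fun k : ℕ => l[(((jm : Nat) : Int) + 3 * (k : Int)).toNat]?)
      = fun k : ℕ => (l.drop jm)[3 * k]? := by
    funext k
    have h1 : (((jm : Nat) : Int) + 3 * (k : Int)).toNat = jm + 3 * k := by omega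
    rw [h1, ← List.getElem?_drop]
  rw [harg, pvFilterMap_stride]

-- zipping the three strided streams and joining recovers the chunks
lemma pvZip_chunks (l : List Char) :
    (((pvEvery3 l).zip (pvEvery3 (l.drop 1))).zip (pvEvery3 (l.drop 2))).map
      (fun p => String.ofList [p.1.1, p.1.2, p.2]) = pvChunks l := by
  induction l using pvChunks.induct with
  | case1 a b c rest ih =>
    rw [show pvEvery3 (a :: b :: c :: rest) = a :: pvEvery3 rest by
          rw [pvEvery3]; rfl,
        show pvEvery3 ((a :: b :: c :: rest).drop 1) = b :: pvEvery3 (rest.drop 1) by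
          rw [List.drop_succ_cons, List.drop_zero, pvEvery3]; rfl,
        show pvEvery3 ((a :: b :: c :: rest).drop 2) = c :: pvEvery3 (rest.drop 2) by
          rw [show (a :: b :: c :: rest).drop 2 = c :: rest from rfl, pvEvery3]]
    simp only [List.zip_cons_cons, List.map_cons]
    rw [pvChunks]
    exact congrArg _ ih
  | case2 l hne =>
    rcases l with _ | ⟨a, l⟩
    · simp [pvEvery3, pvChunks]
    rcases l with _ | ⟨b, l⟩
    · simp [pvEvery3, pvChunks]
    rcases l with _ | ⟨c, l⟩
    · simp [pvEvery3, pvChunks]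
    exact absurd rfl (hne a b c l)

-- A's loop, run from a 3-divisible position i, appends the chunks of the suffix
lemma pvLoop_eq (l : List Char) : ∀ (fuel i : Nat) (acc : List String),
    3 ∣ i → i ≤ l.length - l.length % 3 →
    (l.length - l.length % 3) - i ≤ 3 * fuel →
    arn_to_codons_loop l ((l.length - l.length % 3 : Nat) : Int) (i : Int) acc
      = acc ++ pvChunks (l.drop i) := by
  intro fuel
  induction fuel with
  | zero =>
    intro i acc hdvd hle hfuel
    rw [arn_to_codons_loop, dif_neg (by omega)]
    have hlen : (l.drop i).length < 3 := by rw [List.length_drop]; omega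
    have hnil : pvChunks (l.drop i) = [] := by
      match h : l.drop i, hlen with
      | [], _ => rfl
      | [a], _ => rfl
      | [a, b], _ => rfl
    rw [hnil, List.append_nil]
  | succ n ih =>
    intro i acc hdvd hle hfuel
    by_cases hc : i < l.length - l.length % 3
    · rw [arn_to_codons_loop, dif_pos (by omega)]
      have hi3 : i + 3 ≤ l.length - l.length % 3 := by omega
      have hlen3 : 3 ≤ (l.drop i).length := by rw [List.length_drop]; omega
      obtain ⟨a, b, c, rest, hm⟩ : ∃ a b c rest, l.drop i = a :: b :: c :: rest := by
        match h : l.drop i, hlen3 with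
        | a :: b :: c :: rest, _ => exact ⟨a, b, c, rest, rfl⟩
      have hget : ∀ k : ℕ, l[i + k]? = (l.drop i)[k]? := by
        intro k; rw [← List.getElem?_drop]
      have h0 : PySem.List.pyGet? l (i : Int) = some a := by
        rw [show ((i : Nat) : Int) = ((i + 0 : Nat) : Int) by push_cast; ring]
        simp only [PySem.List.pyGet?_natCast]
        rw [hget 0, hm]; rfl
      have h1 : PySem.List.pyGet? l ((i : Int) + 1) = some b := by
        rw [show ((i : Nat) : Int) + 1 = ((i + 1 : Nat) : Int) by push_cast; ring]
        simp only [PySem.List.pyGet?_natCast]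
        rw [hget 1, hm]; rfl
      have h2 : PySem.List.pyGet? l ((i : Int) + 2) = some c := by
        rw [show ((i : Nat) : Int) + 2 = ((i + 2 : Nat) : Int) by push_cast; ring]
        simp only [PySem.List.pyGet?_natCast]
        rw [hget 2, hm]; rfl
      rw [h0, h1, h2]
      rw [show ((i : Nat) : Int) + 3 = ((i + 3 : Nat) : Int) by push_cast; ring]
      rw [ih (i + 3) (acc ++ [String.ofList [a, b, c]]) (by omega) hi3 (by omega)]
      have hrest : l.drop (i + 3) = rest := by
        have hdd : l.drop (i + 3) = (l.drop i).drop 3 := by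
          simp [List.drop_drop]
        rw [hdd, hm]; rfl
      rw [hrest, hm, pvChunks]
      simp
    · rw [arn_to_codons_loop, dif_neg (by omega)]
      have hlen : (l.drop i).length < 3 := by rw [List.length_drop]; omega
      have hnil : pvChunks (l.drop i) = [] := by
        match h : l.drop i, hlen with
        | [], _ => rfl
        | [a], _ => rfl
        | [a, b], _ => rfl
      rw [hnil, List.append_nil]

-- ===== VERDICT (by name: the statement is the Claim_ definition above) =====
theorem arn_to_codons_spec : Claim_equal_arn_to_codons := by
  intro arn _
  show arn_to_codons arn = arn_to_codons_alt arn
  unfold arn_to_codons arn_to_codons_alt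
  set l := arn.toList with hl
  have hlen : PySem.Str.len arn = (l.length : Int) := by
    simp [PySem.Str.len_eq, hl]
  have hmod : PySem.Int.mod ((l.length : Nat) : Int) 3 = ((l.length % 3 : Nat) : Int) := by
    exact_mod_cast PySem.Int.mod_natCast l.length 3
  have hmp3 : PySem.Str.len arn - PySem.Int.mod (PySem.Str.len arn) 3
      = ((l.length - l.length % 3 : Nat) : Int) := by
    rw [hlen, hmod]; push_cast; omega
  rw [hmp3]
  have hA := pvLoop_eq l l.length 0 [] ⟨0, rfl⟩ (by omega) (by omega)
  simp only [Nat.cast_zero, List.drop_zero, List.nil_append] at hA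
  rw [hA]
  have hs0 := pvSlice3_eq l 0
  have hs1 := pvSlice3_eq l 1
  have hs2 := pvSlice3_eq l 2
  simp only [Nat.cast_zero, Nat.cast_one, Nat.cast_ofNat, List.drop_zero] at hs0 hs1 hs2
  show pvChunks l
      = ((((PySem.List.slice? l (some 0) none 3).getD []).zip
            ((PySem.List.slice? l (some 1) none 3).getD [])).zip
          ((PySem.List.slice? l (some 2) none 3).getD [])).map
          (fun p => String.ofList [p.1.1, p.1.2, p.2])
  rw [hs0, hs1, hs2]
  simp only [Option.getD_some]
  exact (pvZip_chunks l).symm
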